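-- pv_equiv track=rewrite | github.com/huikinglam02gmail/Leetcode_solutions | 2580.count-ways-to-group-overlapping-ranges.py | countWays
-- ===== SOURCE A (Python) =====
-- from typing import List
--
-- def countWays(ranges: List[List[int]]) -> int:
--     ranges.sort()
--     nonOverlap = []
--     result = 1
--     for a, b in ranges:
--         if nonOverlap and a <= nonOverlap[-1][1]: nonOverlap[-1][1] = max(b, nonOverlap[-1][1])
--         else:
--             result *= 2
--             result %= 1000000007
--             nonOverlap.append([a, b])
--     return result
-- ===== SOURCE B (Python) =====
-- def countWays(ranges):
--     ranges.sort()
--     if not ranges: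
--         return 1
--     maxEnds = [ranges[0][1]]
--     for r in ranges[1:]:
--         maxEnds.append(max(maxEnds[-1], r[1]))
--     gaps = sum(1 for r, m in zip(ranges[1:], maxEnds) if r[0] > m)
--     return pow(2, 1 + gaps, 1000000007)
-- ===== Notes on version B (the rewrite author's own statement) =====
-- stated objective: alternative
-- what changed: B drops A's merged-interval list and interleaved modular multiply entirely: it builds a prefix-maximum table of interval ends in one staged pass, then counts 'gap' positions (a start exceeding the running max of all earlier ends) with a comprehension, and returns the closed-form pow(2, 1+gaps, 1000000007); correct because after sorting a new component begins exactly where a start exceeds the prefix maximum of ends.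
import Mathlib
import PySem

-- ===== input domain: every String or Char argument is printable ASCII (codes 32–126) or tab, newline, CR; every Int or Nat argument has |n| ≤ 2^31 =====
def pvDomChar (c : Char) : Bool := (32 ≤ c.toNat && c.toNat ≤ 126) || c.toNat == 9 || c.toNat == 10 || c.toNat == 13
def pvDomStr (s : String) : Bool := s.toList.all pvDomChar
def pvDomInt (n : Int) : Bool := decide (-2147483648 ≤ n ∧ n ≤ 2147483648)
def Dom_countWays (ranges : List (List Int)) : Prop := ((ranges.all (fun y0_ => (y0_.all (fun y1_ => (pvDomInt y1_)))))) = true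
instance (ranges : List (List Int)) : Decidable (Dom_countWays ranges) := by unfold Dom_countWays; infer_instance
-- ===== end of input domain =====

-- B replaces A's stateful merge (a merged-interval list mutated in place, with an
-- interleaved running modular multiply) by staged passes: a prefix-maximum table of
-- interval ends, a count of 'gap' positions (start exceeding the running max of all
-- earlier ends), and one closed-form modular power; objective: alternative.
-- Both A and B sort the argument list in place (same observable mutation);
-- the equivalence proved is about the return value.

-- ===== PORT A =====
-- the for-loop of A: state = (nonOverlap, result); an element that is not a 2-list would
-- raise ValueError on unpacking in Python (excluded by Pre_), ported as a dummy 0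
def countWaysLoop : List (List Int) → List (List Int) → Int → Int
  | [], _, result => result
  | r :: rest, nonOverlap, result =>
    match r with
    | [a, b] =>
      match nonOverlap.getLast? with
      | some last =>
        if a ≤ last.getD 1 0 then
          -- nonOverlap[-1][1] = max(b, nonOverlap[-1][1])
          countWaysLoop rest (nonOverlap.dropLast ++ [[last.getD 0 0, max b (last.getD 1 0)]]) result
        else
          countWaysLoop rest (nonOverlap ++ [[a, b]]) (PySem.Int.mod (result * 2) 1000000007)
      | none => countWaysLoop rest [[a, b]] (PySem.Int.mod (result * 2) 1000000007)
    | _ => 0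

def countWays (ranges : List (List Int)) : Int :=
  countWaysLoop (PySem.List.sorted ranges (fun x => x) false) [] 1

-- ===== PORT B =====
-- B's first staged pass: maxEnds = [s0[1]]; for r in s[1:]: maxEnds.append(max(maxEnds[-1], r[1]))
-- (built by structural recursion carrying maxEnds[-1]; r[1] is r.getD 1 0, total on Pre_)
def buildMaxEnds : List (List Int) → Int → List Int
  | [], _ => []
  | r :: rest, last => (max last (r.getD 1 0)) :: buildMaxEnds rest (max last (r.getD 1 0))

def countWays_alt (ranges : List (List Int)) : Int :=
  match PySem.List.sorted ranges (fun x => x) false with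
  | [] => 1
  | r0 :: rest =>
    -- maxEnds has the seed ranges[0][1] in front; zip(ranges[1:], maxEnds) truncates it
    let maxEnds : List Int := r0.getD 1 0 :: buildMaxEnds rest (r0.getD 1 0)
    let gaps : Nat := ((rest.zip maxEnds).countP (fun p => decide (p.1.getD 0 0 > p.2)))
    PySem.Int.powMod 2 (1 + gaps) 1000000007

-- ===== PRECONDITION & SPEC =====
-- Pre_ excludes exactly the inputs where Python's 'for a, b in ranges' raises ValueError
-- (an inner list whose length is not 2)
def Pre_countWays (ranges : List (List Int)) : Prop := ∀ r ∈ ranges, r.length = 2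
instance (ranges : List (List Int)) : Decidable (Pre_countWays ranges) := by unfold Pre_countWays; infer_instance
def pvWitness_countWays : List (List Int) := [[1, 3], [2, 5], [7, 8]]

def Spec_countWays (ranges : List (List Int)) (out : Int) : Prop := out = countWays_alt ranges
instance (ranges : List (List Int)) (out : Int) : Decidable (Spec_countWays ranges out) := by unfold Spec_countWays; infer_instance

-- ===== CLAIM (what is proved, stated in full; the proofs are below) =====
def Claim_equal_countWays : Prop := ∀ (ranges : List (List Int)), Dom_countWays ranges → Pre_countWays ranges → Spec_countWays ranges (countWays ranges)

-- ===== LEMMAS AND PROOFS =====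

-- a list of length 2 is a literal pair
lemma two_list_shape (r : List Int) (h : r.length = 2) : ∃ a b, r = [a, b] := by
  rcases r with _ | ⟨a, _ | ⟨b, _ | ⟨c, t⟩⟩⟩
  · simp at h
  · simp at h
  · exact ⟨a, b, rfl⟩
  · simp at h

-- proof-side recounting of A's loop: number of new components started while scanning xs,
-- given the current component's running end-maximum m
def gapsA : List (List Int) → Int → Nat
  | [], _ => 0
  | r :: rest, m =>
    if r.getD 0 0 > m then gapsA rest (r.getD 1 0) + 1
    else gapsA rest (max m (r.getD 1 0))

-- proof-side recounting of B's zip/countP: gaps w.r.t. the global prefix maximum M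
def gapsB : List (List Int) → Int → Nat
  | [], _ => 0
  | r :: rest, M =>
    (if r.getD 0 0 > M then 1 else 0) + gapsB rest (max M (r.getD 1 0))

-- one doubling step of A's running product is one increment of the exponent
lemma powMod_step (c : Nat) :
    PySem.Int.mod (PySem.Int.powMod 2 c 1000000007 * 2) 1000000007
      = PySem.Int.powMod 2 (c + 1) 1000000007 := by
  simp only [PySem.Int.powMod, PySem.Int.mod_eq_emod_of_pos (by norm_num : (0:Int) < 1000000007), pow_succ]
  rw [Int.mul_emod, Int.emod_emod_of_dvd _ dvd_rfl, ← Int.mul_emod]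

-- A's loop, with a nonempty nonOverlap list whose last element is 'last', computes
-- 2^(c + gapsA xs last[1]) mod p
lemma loop_gapsA : ∀ (xs : List (List Int)) (pre : List (List Int)) (last : List Int) (c : Nat),
    (∀ r ∈ xs, r.length = 2) →
    countWaysLoop xs (pre ++ [last]) (PySem.Int.powMod 2 c 1000000007)
      = PySem.Int.powMod 2 (c + gapsA xs (last.getD 1 0)) 1000000007 := by
  intro xs
  induction xs with
  | nil => intro pre last c _; simp [countWaysLoop, gapsA]
  | cons r rest ih =>
    intro pre last c h
    obtain ⟨a, b, rfl⟩ := two_list_shape r (h r (by simp))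
    have hrest : ∀ r ∈ rest, r.length = 2 := fun r hr => h r (by simp [hr])
    simp only [countWaysLoop, List.getLast?_concat, gapsA]
    by_cases hle : a ≤ last.getD 1 0
    · rw [if_pos hle, if_neg (by simp only [List.getD_cons_zero]; omega)]
      rw [List.dropLast_concat]
      rw [ih pre [last.getD 0 0, max b (last.getD 1 0)] c hrest]
      simp [List.getD, max_comm]
    · rw [if_neg hle, if_pos (by simp only [List.getD_cons_zero]; omega)]
      rw [powMod_step]
      rw [ih (pre ++ [last]) [a, b] (c + 1) hrest]
      congr 1
      omega

-- the component-local maximum m and the global prefix maximum M classify upcoming starts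
-- identically (invariant: a > m ↔ a > M for every later start a), so both counts agree
lemma gapsA_eq_gapsB : ∀ (xs : List (List Int)) (m M : Int),
    xs.Pairwise (fun r s => r.getD 0 0 ≤ s.getD 0 0) →
    (∀ r ∈ xs, (r.getD 0 0 > m ↔ r.getD 0 0 > M)) →
    gapsA xs m = gapsB xs M := by
  intro xs
  induction xs with
  | nil => intro _ _ _ _; rfl
  | cons r rest ih =>
    intro m M hpw hiff
    have hpwrest := (List.pairwise_cons.mp hpw).2
    have hhead := (List.pairwise_cons.mp hpw).1
    have hr := hiff r (by simp)
    simp only [gapsA, gapsB]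
    by_cases hgt : r.getD 0 0 > m
    · rw [if_pos hgt, if_pos (hr.mp hgt)]
      have h2 : gapsA rest (r.getD 1 0) = gapsB rest (max M (r.getD 1 0)) := by
        refine ih (r.getD 1 0) (max M (r.getD 1 0)) hpwrest ?_
        intro s hs
        have hsa : r.getD 0 0 ≤ s.getD 0 0 := hhead s hs
        have hM : r.getD 0 0 > M := hr.mp hgt
        constructor <;> intro h1 <;> omega
      omega
    · rw [if_neg hgt, if_neg (fun hc => hgt (hr.mpr hc)), Nat.zero_add]
      refine ih (max m (r.getD 1 0)) (max M (r.getD 1 0)) hpwrest ?_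
      intro s hs
      have := hiff s (List.mem_cons_of_mem _ hs)
      constructor <;> intro h1 <;> omega

-- B's zip-with-prefix-max count is gapsB
lemma zip_countP_gapsB : ∀ (xs : List (List Int)) (M : Int),
    ((xs.zip (M :: buildMaxEnds xs M)).countP (fun p => decide (p.1.getD 0 0 > p.2))) = gapsB xs M := by
  intro xs
  induction xs with
  | nil => intro M; rfl
  | cons r rest ih =>
    intro M
    simp only [buildMaxEnds, List.zip_cons_cons, List.countP_cons, gapsB, ih]
    rw [Nat.add_comm]
    simp [gt_iff_lt]

-- the lexicographic order on sorted 2-lists gives nondecreasing first components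
lemma sorted_heads_pairwise (xs : List (List Int)) (h2 : ∀ r ∈ xs, r.length = 2) :
    (PySem.List.sorted xs (fun x => x) false).Pairwise (fun r s => r.getD 0 0 ≤ s.getD 0 0) := by
  have hpw : (PySem.List.sorted xs (fun x => x) false).Pairwise (fun a b => a ≤ b) := by
    convert PySem.List.sorted_pairwise xs (fun x => x) using 2
  have hmem : ∀ r ∈ PySem.List.sorted xs (fun x => x) false, r.length = 2 :=
    fun r hr => h2 r ((PySem.List.mem_sorted _ _ _ r).mp hr)
  refine List.Pairwise.imp_of_mem ?_ hpw
  intro r s hrm hsm hle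
  obtain ⟨a, b, rfl⟩ := two_list_shape r (hmem r hrm)
  obtain ⟨c, d, rfl⟩ := two_list_shape s (hmem s hsm)
  simp only [List.getD, List.getElem?_cons_zero, Option.getD_some]
  by_contra hc
  have hlt : ([c, d] : List Int) < [a, b] := by
    simp [List.cons_lt_cons_iff]
    omega
  exact absurd hle (not_le.mpr hlt)

-- ===== VERDICT (by name: the statement is the Claim_ definition above) =====
theorem countWays_spec : Claim_equal_countWays := by
  intro ranges _ hpre
  unfold Spec_countWays countWays countWays_alt
  have hmem : ∀ r ∈ PySem.List.sorted ranges (fun x => x) false, r.length = 2 :=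
    fun r hr => hpre r ((PySem.List.mem_sorted _ _ _ r).mp hr)
  have hpw := sorted_heads_pairwise ranges hpre
  cases hs : PySem.List.sorted ranges (fun x => x) false with
  | nil => simp [countWaysLoop]
  | cons r0 rest =>
    rw [hs] at hmem hpw
    obtain ⟨a, b, rfl⟩ := two_list_shape r0 (hmem r0 (by simp))
    have hrest : ∀ r ∈ rest, r.length = 2 := fun r hr => hmem r (by simp [hr])
    simp only [countWaysLoop, List.getLast?_nil]
    have h1 : PySem.Int.mod ((1:Int) * 2) 1000000007 = PySem.Int.powMod 2 1 1000000007 := by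
      simp [PySem.Int.powMod, PySem.Int.mod]
    rw [h1]
    have := loop_gapsA rest [] [a, b] 1 hrest
    simp only [List.nil_append] at this
    rw [this]
    rw [zip_countP_gapsB rest (([a,b] : List Int).getD 1 0)]
    rw [gapsA_eq_gapsB rest (([a,b] : List Int).getD 1 0) (([a,b] : List Int).getD 1 0)
        (List.pairwise_cons.mp hpw).2 (fun _ _ => Iff.rfl)]
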